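-- pv_equiv track=rewrite | github.com/robtandy/zac | packages/agent/src/agent/tools.py | truncate_head
-- ===== SOURCE A (Python) =====
-- DEFAULT_MAX_LINES = 500
--
-- DEFAULT_MAX_BYTES = 100 * 1024  # 100KB
--
-- def truncate_head(
--     content: str,
--     max_lines: int = DEFAULT_MAX_LINES,
--     max_bytes: int = DEFAULT_MAX_BYTES,
-- ) -> tuple[str, bool, str | None, int, int]:
--     """
--     Truncate content from the head (keep first N lines/bytes).
--     Returns: (truncated_content, was_truncated, truncated_by_reason, total_lines, output_lines)
--     """
--     total_bytes = len(content.encode("utf-8"))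
--     lines = content.split("\n")
--     total_lines = len(lines)
--
--     # Check if no truncation needed
--     if total_lines <= max_lines and total_bytes <= max_bytes:
--         return (content, False, None, total_lines, total_lines)
--
--     # Check if first line alone exceeds byte limit
--     first_line_bytes = len(lines[0].encode("utf-8"))
--     if first_line_bytes > max_bytes:
--         return ("", True, "first_line_exceeds_limit", total_lines, 0)
--
--     # Collect complete lines that fit
--     output_lines: list[str] = []
--     output_bytes_count = 0
--     truncated_by: str | None = None
--
--     for i, line in enumerate(lines):
--         if i >= max_lines:
--             truncated_by = "lines"
--             break
--
--         line_bytes = len(line.encode("utf-8")) + (1 if i > 0 else 0)  # +1 for newline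
--
--         if output_bytes_count + line_bytes > max_bytes:
--             truncated_by = "bytes"
--             break
--
--         output_lines.append(line)
--         output_bytes_count += line_bytes
--
--     output_content = "\n".join(output_lines)
--     return (output_content, truncated_by is not None, truncated_by, total_lines, len(output_lines))
-- ===== SOURCE B (Python) =====
-- from itertools import accumulate
--
-- DEFAULT_MAX_LINES = 500
--
-- DEFAULT_MAX_BYTES = 100 * 1024  # 100KB
--
--
-- def truncate_head(
--     content: str,
--     max_lines: int = DEFAULT_MAX_LINES,
--     max_bytes: int = DEFAULT_MAX_BYTES,
-- ):
--     total_bytes = len(content.encode("utf-8"))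
--     lines = content.split("\n")
--     total_lines = len(lines)
--
--     if total_lines <= max_lines and total_bytes <= max_bytes:
--         return (content, False, None, total_lines, total_lines)
--
--     if len(lines[0].encode("utf-8")) > max_bytes:
--         return ("", True, "first_line_exceeds_limit", total_lines, 0)
--
--     # cumulative byte totals: cum[j] = bytes of '\n'.join(lines[:j+1])
--     cum = list(accumulate(
--         len(line.encode("utf-8")) + (1 if i > 0 else 0)
--         for i, line in enumerate(lines)
--     ))
--     line_cut = max(max_lines, 0)
--     byte_cut = next((j for j, c in enumerate(cum) if c > max_bytes), None)
--
--     if byte_cut is not None and byte_cut < line_cut: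
--         cut, reason = byte_cut, "bytes"
--     else:
--         cut, reason = line_cut, "lines"
--
--     kept = lines[:cut]
--     return ("\n".join(kept), True, reason, total_lines, len(kept))
-- ===== Notes on version B (the rewrite author's own statement) =====
-- stated objective: alternative
-- what changed: Replaces A's interleaved enumerate-loop (which accumulates output lines and a byte counter and breaks on the first violated limit) by a closed-form computation: a cumulative byte table built with itertools.accumulate and a direct search for the first index exceeding max_bytes, from which the cutoff and the reason are chosen by comparing that index with max(max_lines, 0).
import Mathlib
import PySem

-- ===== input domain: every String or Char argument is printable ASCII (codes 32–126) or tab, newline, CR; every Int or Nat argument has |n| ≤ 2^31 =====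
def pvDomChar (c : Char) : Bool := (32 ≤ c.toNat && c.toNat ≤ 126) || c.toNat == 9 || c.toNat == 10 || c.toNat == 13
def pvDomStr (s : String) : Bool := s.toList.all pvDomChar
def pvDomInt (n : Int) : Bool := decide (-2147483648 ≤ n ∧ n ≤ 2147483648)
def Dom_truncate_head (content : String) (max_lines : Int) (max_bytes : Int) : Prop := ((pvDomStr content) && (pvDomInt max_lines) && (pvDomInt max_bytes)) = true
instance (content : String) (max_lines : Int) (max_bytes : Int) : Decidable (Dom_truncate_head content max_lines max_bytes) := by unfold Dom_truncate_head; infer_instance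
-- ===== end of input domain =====

-- B replaces A's interleaved break-loop by a cumulative byte table plus a direct first-violation
-- search (objective: alternative decomposition, same O(n) cost).
-- NOTE: len(x.encode("utf-8")) is ported as the character count, exact on the ASCII input domain Dom_.

-- ===== PORT A =====
-- A's for-loop over enumerate(lines) with two breaks, as a structural recursion over the
-- remaining lines with the running index i and byte counter acc as state.
def truncLoopA (max_lines max_bytes : Int) : List (List Char) → Nat → Int → List (List Char) × Option String
  | [], _, _ => ([], none)
  | l :: rest, i, acc =>
    if (i : Int) ≥ max_lines then ([], some "lines")
    else
      let line_bytes : Int := (l.length : Int) + (if 0 < i then 1 else 0)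
      if acc + line_bytes > max_bytes then ([], some "bytes")
      else
        let r := truncLoopA max_lines max_bytes rest (i + 1) (acc + line_bytes)
        (l :: r.1, r.2)

def truncate_head (content : String) (max_lines : Int) (max_bytes : Int) : String × Bool × Option String × Int × Int :=
  let cs := content.toList
  let total_bytes : Int := (cs.length : Int)            -- len(content.encode("utf-8")), ASCII-exact
  let lines := PySem.Chars.splitOn cs ['\n']            -- content.split("\n")
  let total_lines : Int := (lines.length : Int)
  if total_lines ≤ max_lines ∧ total_bytes ≤ max_bytes then
    (content, false, none, total_lines, total_lines)
  else
    -- lines[0]: split always returns a nonempty list, so headI is exact here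
    let first_line_bytes : Int := (lines.headI.length : Int)
    if first_line_bytes > max_bytes then
      ("", true, some "first_line_exceeds_limit", total_lines, 0)
    else
      let r := truncLoopA max_lines max_bytes lines 0 0
      (String.ofList (PySem.Chars.join ['\n'] r.1), r.2.isSome, r.2, total_lines, (r.1.length : Int))

-- ===== PORT B =====
-- the generator (len(line.encode())+ (1 if i > 0 else 0) for i, line in enumerate(lines))
def lineCosts : Nat → List (List Char) → List Int
  | _, [] => []
  | i, l :: rest => ((l.length : Int) + (if 0 < i then 1 else 0)) :: lineCosts (i + 1) rest

-- itertools.accumulate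
def accumule : Int → List Int → List Int
  | _, [] => []
  | a, x :: xs => (a + x) :: accumule (a + x) xs

def truncate_head_alt (content : String) (max_lines : Int) (max_bytes : Int) : String × Bool × Option String × Int × Int :=
  let cs := content.toList
  let total_bytes : Int := (cs.length : Int)            -- len(content.encode("utf-8")), ASCII-exact
  let lines := PySem.Chars.splitOn cs ['\n']            -- content.split("\n")
  let total_lines : Int := (lines.length : Int)
  if total_lines ≤ max_lines ∧ total_bytes ≤ max_bytes then
    (content, false, none, total_lines, total_lines)
  else if (lines.headI.length : Int) > max_bytes then
    ("", true, some "first_line_exceeds_limit", total_lines, 0)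
  else
    let cum := accumule 0 (lineCosts 0 lines)
    let line_cut : Int := max max_lines 0
    -- next((j for j, c in enumerate(cum) if c > max_bytes), None)
    let byte_cut := List.findIdx? (fun c => decide (max_bytes < c)) cum
    let cut_reason : Nat × String :=
      match byte_cut with
      | some j => if (j : Int) < line_cut then (j, "bytes") else (line_cut.toNat, "lines")
      | none => (line_cut.toNat, "lines")
    let kept := lines.take cut_reason.1
    (String.ofList (PySem.Chars.join ['\n'] kept), true, some cut_reason.2, total_lines, (kept.length : Int))

-- ===== PRECONDITION & SPEC =====
def Spec_truncate_head (content : String) (max_lines : Int) (max_bytes : Int) (out : String × Bool × Option String × Int × Int) : Prop := out = truncate_head_alt content max_lines max_bytes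
instance (content : String) (max_lines : Int) (max_bytes : Int) (out : String × Bool × Option String × Int × Int) : Decidable (Spec_truncate_head content max_lines max_bytes out) := by unfold Spec_truncate_head; infer_instance

-- ===== CLAIM (what is proved, stated in full; the proofs are below) =====
def Claim_equal_truncate_head : Prop := ∀ (content : String) (max_lines : Int) (max_bytes : Int), Dom_truncate_head content max_lines max_bytes → Spec_truncate_head content max_lines max_bytes (truncate_head content max_lines max_bytes)

-- ===== LEMMAS AND PROOFS =====

lemma splitOnP_cons (p : Char → Bool) (a : Char) (t : List Char) :
    List.splitOnP p (a :: t)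
      = if p a then [] :: List.splitOnP p t else (List.splitOnP p t).modifyHead (a :: ·) := by
  rw [List.splitOnP.eq_1, List.splitOnP.go.eq_2]
  by_cases h : p a <;> simp [h, List.splitOnP.go_acc, List.modifyHead]
  cases List.splitOnP p t <;> rfl

-- PySem.Chars.splitOn with a single-character separator is Mathlib's List.splitOn.
lemma splitOn_go_nil (c : Char) (n : Nat) (cur : List Char) (acc : List (List Char)) :
    PySem.Chars.splitOn.go [c] (n + 1) [] cur acc = (cur.reverse :: acc).reverse := by
  simp [PySem.Chars.splitOn.go]

lemma splitOn_go_cons (c : Char) (n : Nat) (ch : Char) (rest cur : List Char) (acc : List (List Char)) :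
    PySem.Chars.splitOn.go [c] (n + 1) (ch :: rest) cur acc =
      if (c == ch : Bool) then PySem.Chars.splitOn.go [c] n rest [] (cur.reverse :: acc)
      else PySem.Chars.splitOn.go [c] n rest (ch :: cur) acc := by
  rw [PySem.Chars.splitOn.go]
  simp [List.isPrefixOf]

lemma splitOn_go_single (c : Char) : ∀ (fuel : Nat) (l cur : List Char) (acc : List (List Char)),
    l.length < fuel →
    PySem.Chars.splitOn.go [c] fuel l cur acc
      = acc.reverse ++ (List.splitOnP (· == c) l).modifyHead (cur.reverse ++ ·) := by
  intro fuel
  induction fuel with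
  | zero => intro l cur acc h; omega
  | succ n ih =>
    intro l cur acc h
    cases l with
    | nil =>
      simp [splitOn_go_nil, List.splitOnP_nil, List.modifyHead]
    | cons ch rest =>
      rw [splitOn_go_cons, splitOnP_cons]
      simp only [List.length_cons] at h
      by_cases hc : c = ch
      · have hc' : (c == ch : Bool) = true := beq_iff_eq.mpr hc
        have hch : (ch == c : Bool) = true := beq_iff_eq.mpr hc.symm
        rw [if_pos hc', if_pos hch, ih rest [] (cur.reverse :: acc) (by omega)]
        cases hsp : List.splitOnP (fun x => x == c) rest with
        | nil => exact absurd hsp (List.splitOnP_ne_nil _ _)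
        | cons s0 ss => simp [List.modifyHead]
      · have hc' : ¬ ((c == ch : Bool) = true) := by simp [hc]
        have hch : ¬ ((ch == c : Bool) = true) := by simp; exact fun e => hc e.symm
        rw [if_neg hc', if_neg hch, ih rest (ch :: cur) acc (by omega)]
        cases hsp : List.splitOnP (fun x => x == c) rest with
        | nil => exact absurd hsp (List.splitOnP_ne_nil _ _)
        | cons s0 ss => simp [List.modifyHead, List.reverse_cons, List.append_assoc]

lemma splitOn_single (c : Char) (cs : List Char) :
    PySem.Chars.splitOn cs [c] = List.splitOn c cs := by
  have h := splitOn_go_single c (cs.length + 1) cs [] [] (by omega)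
  rw [PySem.Chars.splitOn] at *
  rw [h]
  simp only [List.splitOn, List.reverse_nil, List.nil_append]
  cases List.splitOnP (fun x => x == c) cs <;> simp [List.modifyHead]

lemma splitOn_ne_nil (c : Char) (cs : List Char) : PySem.Chars.splitOn cs [c] ≠ [] := by
  rw [splitOn_single]
  simp only [List.splitOn]
  exact List.splitOnP_ne_nil _ _

lemma lineCosts_ne_nil (i : Nat) (L : List (List Char)) (h : L ≠ []) : lineCosts i L ≠ [] := by
  cases L with
  | nil => exact absurd rfl h
  | cons l rest => simp [lineCosts]

lemma lineCosts_sum_pos : ∀ (L : List (List Char)) (i : Nat), 0 < i →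
    (lineCosts i L).sum = ((L.map List.length).sum : Int) + L.length := by
  intro L
  induction L with
  | nil => intro i _; simp [lineCosts]
  | cons l rest ih =>
    intro i hi
    have h2 := ih (i + 1) (by omega)
    simp only [lineCosts, List.sum_cons, if_pos hi, h2, List.map_cons, List.length_cons]
    push_cast
    ring

lemma intercalate_length_cons (c : Char) : ∀ (ps : List (List Char)) (p0 : List Char),
    ([c].intercalate (p0 :: ps)).length = p0.length + (ps.map List.length).sum + ps.length := by
  intro ps
  induction ps with
  | nil => intro p0; simp [List.intercalate]
  | cons p1 ps ih =>
    intro p0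
    have hstep : [c].intercalate (p0 :: p1 :: ps) = p0 ++ [c] ++ [c].intercalate (p1 :: ps) := by
      simp [List.intercalate, List.intersperse]
    rw [hstep]
    simp [List.length_append, ih p1]
    omega

lemma lineCosts_sum (cs : List Char) :
    (lineCosts 0 (PySem.Chars.splitOn cs ['\n'])).sum = (cs.length : Int) := by
  rw [splitOn_single]
  rcases h : List.splitOn '\n' cs with _ | ⟨p0, ps⟩
  · exfalso
    have : List.splitOn '\n' cs ≠ [] := by
      simp only [List.splitOn]; exact List.splitOnP_ne_nil _ _
    exact this h
  · have hcs : [('\n' : Char)].intercalate (p0 :: ps) = cs := by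
      rw [← h]; exact List.intercalate_splitOn cs '\n'
    have hlen := intercalate_length_cons '\n' ps p0
    rw [hcs] at hlen
    have h1 : (lineCosts 1 ps).sum = ((ps.map List.length).sum : Int) + ps.length :=
      lineCosts_sum_pos ps 1 (by omega)
    simp only [lineCosts, List.sum_cons, h1]
    rw [hlen]
    push_cast
    ring

lemma accumule_mem_sum : ∀ (xs : List Int) (a : Int), xs ≠ [] → a + xs.sum ∈ accumule a xs := by
  intro xs
  induction xs with
  | nil => intro a h; exact absurd rfl h
  | cons x xs ih =>
    intro a _
    by_cases hx : xs = []
    · subst hx; simp [accumule]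
    · have h2 := ih (a + x) hx
      show a + (x :: xs).sum ∈ (a + x) :: accumule (a + x) xs
      rw [List.sum_cons, ← add_assoc]
      exact List.mem_cons_of_mem _ h2

-- the heart: A's loop result, characterised by the cumulative table
lemma truncLoopA_eq (ml mb : Int) : ∀ (L : List (List Char)) (i : Nat) (acc : Int),
    truncLoopA ml mb L i acc =
      match List.findIdx? (fun c => decide (mb < c)) (accumule acc (lineCosts i L)) with
      | some j => if ((i : Int) + j) < ml then (L.take j, some "bytes")
                  else (L.take (ml - i).toNat, some "lines")
      | none => if L ≠ [] ∧ ml < (i : Int) + L.length then (L.take (ml - i).toNat, some "lines")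
                else (L, none) := by
  intro L
  induction L with
  | nil => intro i acc; simp [truncLoopA, lineCosts, accumule]
  | cons l rest ih =>
    intro i acc
    rw [truncLoopA]
    simp only [lineCosts, accumule, List.findIdx?_cons]
    by_cases hml : (i : Int) ≥ ml
    · rw [if_pos hml]
      have htk : (ml - i).toNat = 0 := by omega
      by_cases hb : mb < acc + ((l.length : Int) + if 0 < i then 1 else 0)
      · simp only [hb, decide_true, if_pos]
        rw [if_neg (by push_cast; omega), htk]
        simp
      · have hbf : (decide (mb < acc + ((l.length : Int) + if 0 < i then 1 else 0))) = false := by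
          simp; omega
        simp only [hbf, Bool.false_eq_true, if_false]
        cases hf : List.findIdx? (fun c => decide (mb < c))
            (accumule (acc + ((l.length : Int) + if 0 < i then 1 else 0)) (lineCosts (i + 1) rest)) with
        | some j =>
          simp only [Option.map_some]
          rw [if_neg (by push_cast; omega), htk]
          simp
        | none =>
          simp only [Option.map_none]
          rw [if_pos ⟨by simp, by simp; omega⟩, htk]
          simp
    · rw [if_neg hml]
      by_cases hb : acc + ((l.length : Int) + if 0 < i then 1 else 0) > mb
      · rw [if_pos hb]
        simp only [hb, decide_true, if_pos]
        rw [if_pos (by push_cast; omega)]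
        simp
      · rw [if_neg hb]
        have hbf : (decide (mb < acc + ((l.length : Int) + if 0 < i then 1 else 0))) = false := by
          simp; omega
        simp only [hbf, Bool.false_eq_true, if_false]
        rw [ih]
        have hsplit : (ml - i).toNat = (ml - ((i : Int) + 1)).toNat + 1 := by omega
        cases hf : List.findIdx? (fun c => decide (mb < c))
            (accumule (acc + ((l.length : Int) + if 0 < i then 1 else 0)) (lineCosts (i + 1) rest)) with
        | some j =>
          simp only [Option.map_some]
          by_cases hj : ((i : Int) + 1 + j) < ml
          · rw [if_pos (by push_cast; omega), if_pos (by push_cast; omega)]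
            simp [List.take_succ_cons]
          · rw [if_neg (by push_cast; omega), if_neg (by push_cast; omega)]
            rw [hsplit]
            simp [List.take_succ_cons]
        | none =>
          simp only [Option.map_none]
          by_cases hr : rest = []
          · subst hr
            rw [if_neg (by simp), if_neg (by simp; omega)]
          · by_cases hcond : ml < (i : Int) + 1 + rest.length
            · rw [if_pos ⟨hr, by push_cast; omega⟩,
                 if_pos ⟨by simp, by simp; omega⟩]
              rw [hsplit]
              simp [List.take_succ_cons]
            · rw [if_neg (by push_cast; omega),
                 if_neg (by simp; omega)]

-- ===== VERDICT (by name: the statement is the Claim_ definition above) =====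
theorem truncate_head_spec : Claim_equal_truncate_head := by
  intro content ml mb _
  unfold Spec_truncate_head truncate_head truncate_head_alt
  by_cases h1 : (((PySem.Chars.splitOn content.toList ['\n']).length : Int) ≤ ml
      ∧ ((content.toList.length : Int) ≤ mb))
  · simp only [h1, and_self, if_pos]
  · rw [if_neg h1, if_neg h1]
    by_cases h2 : ((PySem.Chars.splitOn content.toList ['\n']).headI.length : Int) > mb
    · rw [if_pos h2, if_pos h2]
    · rw [if_neg h2, if_neg h2]
      rw [truncLoopA_eq]
      cases hf : List.findIdx? (fun c => decide (mb < c))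
          (accumule 0 (lineCosts 0 (PySem.Chars.splitOn content.toList ['\n']))) with
      | some j =>
        by_cases hj : (j : Int) < ml
        · simp [hf, hj, List.length_take, Nat.cast_min]
        · have hj0 : ¬ ((j : Int) < 0) := by omega
          have hmt : ml.toNat = (max ml 0).toNat := by omega
          simp [hf, hj, hj0, hmt, List.length_take, Nat.cast_min]
      | none =>
        have hne := splitOn_ne_nil '\n' content.toList
        have hsum : (content.toList.length : Int) ≤ mb := by
          have hmem := accumule_mem_sum (lineCosts 0 (PySem.Chars.splitOn content.toList ['\n'])) 0
            (lineCosts_ne_nil 0 _ hne)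
          rw [List.findIdx?_eq_none_iff] at hf
          have := hf _ hmem
          rw [zero_add, lineCosts_sum] at this
          simpa using this
        have hml : ml < ((PySem.Chars.splitOn content.toList ['\n']).length : Int) := by
          by_contra hc
          exact h1 ⟨by omega, hsum⟩
        have hmt : ml.toNat = (max ml 0).toNat := by omega
        have hcast : (((max ml 0).toNat : Int)) = max ml 0 := by omega
        simp [hf, hne, hml, hmt, hcast, List.length_take, Nat.cast_min]
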